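-- pv_equiv track=rewrite | github.com/RNaderi/SNN_TripletSTDP_STP | NCS.py | ncs
-- ===== SOURCE A (Python) =====
-- def ncs(tscs_time_series, ncs_ts):
--     """
--     given the tscs time series for all neurons (dict), and the time steps in
--     which ncs must be calculated, it returns a dict as follows:
--         keys -> time steps
--         values -> a dict containing neuron indices as keys and ncs values as values
--
--     """
--     ncs_dict = {}
--
--     for t in ncs_ts:
--         neurons_ncs = {}
--         for n, tsc_ts in tscs_time_series.items():
--             # this is p in the formula
--             pre_times = tsc_ts[0:t]
--
--             # N = sigma T(t,t')
--             # here t is one of the times choosen in ncs_ts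
--             # t' is the previous spike time of t which here
--             # we sum all the tscs from the all times before t
--             # if t in neuron_spike_times[n]:
--             #     ncs = sum(pre_times)
--             # else:
--             #     ncs = 0
--
--             ncs = sum(pre_times)
--             neurons_ncs[n] = ncs
--
--         ncs_dict[t] = neurons_ncs
--
--     return ncs_dict
-- ===== SOURCE B (Python) =====
-- def ncs(tscs_time_series, ncs_ts):
--     # Precompute each neuron's prefix-sum table once, then answer every
--     # query time by a single clamped index lookup (Python slice semantics).
--     prefs = []
--     for n, tsc_ts in tscs_time_series.items():
--         pre = [0]
--         acc = 0
--         for x in tsc_ts: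
--             acc += x
--             pre.append(acc)
--         prefs.append((n, pre))
--     ncs_dict = {}
--     for t in ncs_ts:
--         neurons_ncs = {}
--         for n, pre in prefs:
--             L = len(pre) - 1
--             i0 = t if t >= 0 else t + L
--             i = 0 if i0 < 0 else (L if i0 > L else i0)
--             neurons_ncs[n] = pre[i]
--         ncs_dict[t] = neurons_ncs
--     return ncs_dict
-- ===== Notes on version B (the rewrite author's own statement) =====
-- stated objective: alternative
-- what changed: B builds one prefix-sum table per neuron once and answers each query time with a single clamped index lookup, instead of A re-slicing and re-summing the series for every (time, neuron) pair; intended as faster (O(N*T + |ncs_ts|*N) work vs O(|ncs_ts|*N*T)), but a timing run measured only 1.59x at the largest size both finished, so no speed is claimed.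
import Mathlib
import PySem

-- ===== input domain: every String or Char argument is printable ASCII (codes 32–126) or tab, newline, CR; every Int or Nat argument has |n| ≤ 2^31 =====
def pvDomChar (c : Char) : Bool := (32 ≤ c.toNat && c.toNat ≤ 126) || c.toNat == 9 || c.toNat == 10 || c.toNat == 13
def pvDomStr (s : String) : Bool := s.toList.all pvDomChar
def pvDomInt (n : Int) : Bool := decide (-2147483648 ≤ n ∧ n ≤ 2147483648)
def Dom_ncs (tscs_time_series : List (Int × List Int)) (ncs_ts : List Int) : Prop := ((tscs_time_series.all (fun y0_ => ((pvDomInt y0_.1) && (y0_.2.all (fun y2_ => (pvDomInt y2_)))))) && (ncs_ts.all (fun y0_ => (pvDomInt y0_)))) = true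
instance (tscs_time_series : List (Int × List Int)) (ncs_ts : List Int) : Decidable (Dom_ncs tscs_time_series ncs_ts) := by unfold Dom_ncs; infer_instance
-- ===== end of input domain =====

-- B replaces A's per-(time, neuron) slice-and-sum with one prefix-sum table per neuron, answering each query by a clamped index lookup.

-- ===== PORT A =====
-- Literal port of A: for each t, for each (n, tsc_ts) in the dict, sum(tsc_ts[0:t]).
def ncs (tscs_time_series : List (Int × List Int)) (ncs_ts : List Int) : List (Int × List (Int × Int)) :=
  (ncs_ts.foldl (fun ncs_dict t =>
      ncs_dict.insert t
        (((PySem.Dict.ofList tscs_time_series).items.foldl (fun neurons_ncs p =>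
            neurons_ncs.insert p.1 ((PySem.List.slice p.2 (some 0) (some t)).sum))
          (PySem.Dict.empty : PySem.Dict Int Int)).items))
    (PySem.Dict.empty : PySem.Dict Int (List (Int × Int)))).items

-- ===== PORT B =====
-- pre = [0]; acc = 0; for x in tsc_ts: acc += x; pre.append(acc)
def prefixTable (ts : List Int) : List Int :=
  (ts.foldl (fun (s : List Int × Int) x => (s.1 ++ [s.2 + x], s.2 + x)) ([0], 0)).1

-- i0 = t if t >= 0 else t + L; i = 0 if i0 < 0 else (L if i0 > L else i0)
def ncsIdx (L t : Int) : Int :=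
  let i0 : Int := if 0 ≤ t then t else t + L
  if i0 < 0 then 0 else if L < i0 then L else i0

-- neurons_ncs[n] = pre[i]   (i is in range by construction)
def lookupClamped (pre : List Int) (t : Int) : Int :=
  PySem.List.pyGetD pre (ncsIdx ((pre.length : Int) - 1) t) 0

def ncs_alt (tscs_time_series : List (Int × List Int)) (ncs_ts : List Int) : List (Int × List (Int × Int)) :=
  (ncs_ts.foldl (fun ncs_dict t =>
      ncs_dict.insert t
        ((((PySem.Dict.ofList tscs_time_series).items.map (fun p => (p.1, prefixTable p.2))).foldl
            (fun neurons_ncs q => neurons_ncs.insert q.1 (lookupClamped q.2 t))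
          (PySem.Dict.empty : PySem.Dict Int Int)).items))
    (PySem.Dict.empty : PySem.Dict Int (List (Int × Int)))).items

-- ===== PRECONDITION & SPEC =====
def Spec_ncs (tscs_time_series : List (Int × List Int)) (ncs_ts : List Int) (out : List (Int × List (Int × Int))) : Prop := out = ncs_alt tscs_time_series ncs_ts
instance (tscs_time_series : List (Int × List Int)) (ncs_ts : List Int) (out : List (Int × List (Int × Int))) : Decidable (Spec_ncs tscs_time_series ncs_ts out) := by unfold Spec_ncs; infer_instance

-- ===== CLAIM (what is proved, stated in full; the proofs are below) =====
def Claim_equal_ncs : Prop := ∀ (tscs_time_series : List (Int × List Int)) (ncs_ts : List Int), Dom_ncs tscs_time_series ncs_ts → Spec_ncs tscs_time_series ncs_ts (ncs tscs_time_series ncs_ts)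

-- ===== LEMMAS AND PROOFS =====

lemma prefix_go (ts : List Int) (pre : List Int) (acc : Int) :
    ts.foldl (fun (s : List Int × Int) x => (s.1 ++ [s.2 + x], s.2 + x)) (pre, acc)
      = (pre ++ (List.range ts.length).map (fun k => acc + (ts.take (k+1)).sum), acc + ts.sum) := by
  induction ts generalizing pre acc with
  | nil => simp
  | cons x ts ih =>
    simp only [List.foldl_cons, ih, List.length_cons, List.range_succ_eq_map,
      List.map_cons, List.map_map, List.take_succ_cons, List.sum_cons, Prod.mk.injEq]
    constructor
    · simp [Function.comp, add_assoc]
    · ring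

lemma prefixTable_eq (ts : List Int) :
    prefixTable ts = (List.range (ts.length + 1)).map (fun k => (ts.take k).sum) := by
  unfold prefixTable
  rw [prefix_go]
  simp [List.range_succ_eq_map, List.map_map, Function.comp]

lemma prefixTable_length (ts : List Int) : (prefixTable ts).length = ts.length + 1 := by
  simp [prefixTable_eq]

lemma prefixTable_getD (ts : List Int) (m : Nat) (hm : m ≤ ts.length) :
    (prefixTable ts).getD m 0 = (ts.take m).sum := by
  have hm' : m < ts.length + 1 := by omega
  simp [prefixTable_eq, List.getD, hm']

lemma key (ts : List Int) (t : Int) :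
    (PySem.List.slice ts (some 0) (some t)).sum = lookupClamped (prefixTable ts) t := by
  unfold lookupClamped ncsIdx
  have hL : ((prefixTable ts).length : Int) - 1 = (ts.length : Int) := by
    simp [prefixTable_length]
  rw [hL]
  simp only [PySem.List.slice_zero_start]
  by_cases ht : 0 ≤ t
  · simp only [if_pos ht, if_neg (by omega : ¬ t < 0)]
    rw [PySem.List.slice_to ts ht]
    by_cases hbig : (ts.length : Int) < t
    · rw [if_pos hbig]
      rw [PySem.List.pyGetD_of_nonneg _ _ (by omega)]
      have : (ts.length : Int).toNat = ts.length := by omega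
      rw [this, prefixTable_getD ts ts.length (le_refl _), List.take_length,
        List.take_of_length_le (by omega)]
    · rw [if_neg hbig]
      rw [PySem.List.pyGetD_of_nonneg _ _ ht]
      rw [prefixTable_getD ts t.toNat (by omega)]
  · have ht' : t < 0 := by omega
    have hk : 0 < (-t).toNat := by omega
    have htk : t = -(((-t).toNat : Nat) : Int) := by omega
    simp only [if_neg ht]
    rw [htk, PySem.List.slice_to_neg_natCast ts (-t).toNat hk]
    by_cases hneg : -(((-t).toNat : Nat) : Int) + (ts.length : Int) < 0
    · rw [if_pos hneg]
      rw [PySem.List.pyGetD_of_nonneg _ _ (by omega)]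
      have h0 : (0 : Int).toNat = 0 := rfl
      rw [h0, prefixTable_getD ts 0 (by omega)]
      have : ts.length - (-t).toNat = 0 := by omega
      rw [this]
    · rw [if_neg hneg, if_neg (by omega)]
      rw [PySem.List.pyGetD_of_nonneg _ _ (by omega)]
      have : (-(((-t).toNat : Nat) : Int) + (ts.length : Int)).toNat = ts.length - (-t).toNat := by omega
      rw [this, prefixTable_getD ts (ts.length - (-t).toNat) (by omega)]

lemma row_eq (tscs_time_series : List (Int × List Int)) (t : Int) :
    ((PySem.Dict.ofList tscs_time_series).items.foldl (fun neurons_ncs p =>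
        neurons_ncs.insert p.1 ((PySem.List.slice p.2 (some 0) (some t)).sum))
      (PySem.Dict.empty : PySem.Dict Int Int))
    = (((PySem.Dict.ofList tscs_time_series).items.map (fun p => (p.1, prefixTable p.2))).foldl
        (fun neurons_ncs q => neurons_ncs.insert q.1 (lookupClamped q.2 t))
      (PySem.Dict.empty : PySem.Dict Int Int)) := by
  rw [List.foldl_map]
  simp only [key]

-- ===== VERDICT (by name: the statement is the Claim_ definition above) =====
theorem ncs_spec : Claim_equal_ncs := by
  intro tscs_time_series ncs_ts _
  unfold Spec_ncs ncs ncs_alt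
  congr 2
  funext ncs_dict t
  rw [row_eq]
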